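-- pv_equiv track=rewrite | github.com/thevolcanomanishere/gud-price | generated/python/test_rpc.py | _encode_aggregate3_response
-- ===== SOURCE A (Python) =====
-- def _encode_aggregate3_response(results: list) -> str:
--     """Build a fake ABI-encoded Multicall3.aggregate3 Result[] return value.
--
--     Each element of *results* is a ``(success: bool, data_hex: str)`` pair.
--     """
--     n = len(results)
--     data_hexes = [r[1][2:] for r in results]  # strip "0x"
--     data_lens = [len(h) // 2 for h in data_hexes]
--     padded_lens = [((d + 31) // 32) * 32 for d in data_lens]
--     # Each element: bool(32) + bytes_ptr(32) + bytes_len(32) + bytes_data(padded) = 96 + padded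
--     elem_sizes = [96 + p for p in padded_lens]
--
--     parts: list[str] = []
--     parts.append(format(32, "064x"))   # outer offset to array
--     parts.append(format(n, "064x"))    # array length
--     offset = n * 32
--     for sz in elem_sizes:
--         parts.append(format(offset, "064x"))
--         offset += sz
--     for i, (success, _) in enumerate(results):
--         h = data_hexes[i]
--         d = data_lens[i]
--         p = padded_lens[i]
--         parts.append(format(1 if success else 0, "064x"))  # bool success
--         parts.append(format(64, "064x"))                    # bytes ptr (2 words)
--         parts.append(format(d, "064x"))                     # bytes length
--         parts.append(h.ljust(p * 2, "0"))                   # bytes data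
--     return "0x" + "".join(parts)
-- ===== SOURCE B (Python) =====
-- def _encode_aggregate3_response(results: list) -> str:
--     """Divide-and-conquer: recursively encode halves of the result list, each recursion
--     returning (head, body, size) and placing the right half at offset off + left size."""
--     def rec(items, off):
--         if not items:
--             return "", "", 0
--         if len(items) == 1:
--             success, data_hex = items[0]
--             h = data_hex[2:]
--             d = len(h) // 2
--             tail = h.ljust(((d + 31) // 32) * 64, "0")
--             body = (format(1 if success else 0, "064x") + format(64, "064x")
--                     + format(d, "064x") + tail)
--             return format(off, "064x"), body, 96 + len(tail) // 2
--         mid = len(items) // 2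
--         h1, b1, s1 = rec(items[:mid], off)
--         h2, b2, s2 = rec(items[mid:], off + s1)
--         return h1 + h2, b1 + b2, s1 + s2
--     head, body, _ = rec(results, len(results) * 32)
--     return "0x" + format(32, "064x") + format(len(results), "064x") + head + body
-- ===== Notes on version B (the rewrite author's own statement) =====
-- stated objective: alternative
-- what changed: Replaces A's four parallel size-table comprehensions and two sequential emission loops with a divide-and-conquer recursion that encodes the two halves of the list independently, returning (head, body, size) per subtree and placing the right half at offset off + left size.
import Mathlib
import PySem

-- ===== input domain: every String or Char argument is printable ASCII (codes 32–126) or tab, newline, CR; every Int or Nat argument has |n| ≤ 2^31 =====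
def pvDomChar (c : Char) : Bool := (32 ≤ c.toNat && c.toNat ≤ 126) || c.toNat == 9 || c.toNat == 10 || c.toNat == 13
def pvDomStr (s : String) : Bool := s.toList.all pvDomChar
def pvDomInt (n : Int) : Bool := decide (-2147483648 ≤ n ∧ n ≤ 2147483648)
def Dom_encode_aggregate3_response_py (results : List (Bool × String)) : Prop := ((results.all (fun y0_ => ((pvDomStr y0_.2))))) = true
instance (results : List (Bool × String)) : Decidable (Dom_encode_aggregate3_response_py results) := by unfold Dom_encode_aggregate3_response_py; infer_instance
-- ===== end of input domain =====

-- B replaces A's parallel size tables and two sequential emission loops with a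
-- divide-and-conquer recursion over the list (objective: alternative, same cost).

-- ===== PORT A =====
-- format(n, "064x") for a nonnegative int: lowercase hex, zero-padded to 64 digits
-- (ported by hand: Nat.toDigits 16 gives Python's lowercase hex digits; exact for Nat).
def pyFormat064x (n : Nat) : List Char :=
  let s := Nat.toDigits 16 n
  List.replicate (64 - s.length) '0' ++ s

def encode_aggregate3_response_py (results : List (Bool × String)) : String :=
  let n := results.length
  let data_hexes := results.map (fun r => PySem.Chars.slice r.2.toList (some 2) none)
  let data_lens := data_hexes.map (fun h => h.length / 2)
  let padded_lens := data_lens.map (fun d => ((d + 31) / 32) * 32)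
  let elem_sizes := padded_lens.map (fun p => 96 + p)
  let parts0 : List (List Char) := [pyFormat064x 32, pyFormat064x n]
  let st := elem_sizes.foldl
    (fun (st : List (List Char) × Nat) sz => (st.1 ++ [pyFormat064x st.2], st.2 + sz))
    (parts0, n * 32)
  -- for i, (success, _) in enumerate(results) — the indexes i are produced in range, so
  -- getD transcribes data_hexes[i] etc. exactly; h.ljust(p*2, "0") is h ++ replicate '0'.
  let parts := (PySem.List.enumerate results).foldl
    (fun acc ir =>
      let i := ir.1.toNat
      let h := data_hexes.getD i []
      let d := data_lens.getD i 0
      let p := padded_lens.getD i 0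
      acc ++ [pyFormat064x (if ir.2.1 then 1 else 0), pyFormat064x 64, pyFormat064x d,
              h ++ List.replicate (p * 2 - h.length) '0'])
    st.1
  String.mk ('0' :: 'x' :: parts.flatten)

-- ===== PORT B =====
-- divide-and-conquer helper rec(items, off) -> (head, body, size)
def pvAltRec (items : List (Bool × String)) (off : Nat) : List Char × List Char × Nat :=
  match items with
  | [] => ([], [], 0)
  | [r] =>
      let h := PySem.Chars.slice r.2.toList (some 2) none
      let d := h.length / 2
      let tail := h ++ List.replicate (((d + 31) / 32) * 64 - h.length) '0'
      let body := pyFormat064x (if r.1 then 1 else 0) ++ pyFormat064x 64 ++ pyFormat064x d ++ tail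
      (pyFormat064x off, body, 96 + tail.length / 2)
  | a :: b :: t =>
      let mid := (a :: b :: t).length / 2
      match pvAltRec ((a :: b :: t).take mid) off with
      | (h1, b1, s1) =>
        match pvAltRec ((a :: b :: t).drop mid) (off + s1) with
        | (h2, b2, s2) => (h1 ++ h2, b1 ++ b2, s1 + s2)
termination_by items.length
decreasing_by
  · simp [List.length_take]; omega
  · simp [List.length_drop]; omega

def encode_aggregate3_response_py_alt (results : List (Bool × String)) : String :=
  let st := pvAltRec results (results.length * 32)
  String.mk ('0' :: 'x' ::
    (pyFormat064x 32 ++ pyFormat064x results.length ++ st.1 ++ st.2.1))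

-- ===== PRECONDITION & SPEC =====
def Spec_encode_aggregate3_response_py (results : List (Bool × String)) (out : String) : Prop := out = encode_aggregate3_response_py_alt results
instance (results : List (Bool × String)) (out : String) : Decidable (Spec_encode_aggregate3_response_py results out) := by unfold Spec_encode_aggregate3_response_py; infer_instance

-- ===== CLAIM (what is proved, stated in full; the proofs are below) =====
def Claim_equal_encode_aggregate3_response_py : Prop := ∀ (results : List (Bool × String)), Dom_encode_aggregate3_response_py results → Spec_encode_aggregate3_response_py results (encode_aggregate3_response_py results)

-- ===== LEMMAS AND PROOFS =====

-- per-element data of A's comprehensions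
def eH (r : Bool × String) : List Char := PySem.Chars.slice r.2.toList (some 2) none
def eD (r : Bool × String) : Nat := (eH r).length / 2
def eP (r : Bool × String) : Nat := ((eD r + 31) / 32) * 32
def eT (r : Bool × String) : List Char := eH r ++ List.replicate (eP r * 2 - (eH r).length) '0'
def eS (r : Bool × String) : Nat := 96 + eP r
def bodyA (r : Bool × String) : List (List Char) :=
  [pyFormat064x (if r.1 then 1 else 0), pyFormat064x 64, pyFormat064x (eD r), eT r]

def offW : Nat → List Nat → List (List Char)
  | _, [] => []
  | off, s :: ss => pyFormat064x off :: offW (off + s) ss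

lemma size_eq (r : Bool × String) : 96 + (eT r).length / 2 = eS r := by
  simp only [eT, eS, eP, eD, List.length_append, List.length_replicate]
  generalize (eH r).length = L
  have hd : L / 2 * 2 ≤ L ∧ L < L / 2 * 2 + 2 := by omega
  generalize hD : L / 2 = d at *
  have hq : (d + 31) / 32 * 32 ≤ d + 31 ∧ d ≤ (d + 31) / 32 * 32 := by omega
  generalize hQ : (d + 31) / 32 = q at *
  omega

lemma offW_append (xs ys : List Nat) (off : Nat) :
    offW off (xs ++ ys) = offW off xs ++ offW (off + xs.sum) ys := by
  induction xs generalizing off with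
  | nil => simp [offW]
  | cons a t ih => simp [offW, ih, Nat.add_assoc]

-- characterisation of B's divide-and-conquer recursion
lemma pvAltRec_eq (items : List (Bool × String)) (off : Nat) :
    pvAltRec items off
      = ((offW off (items.map eS)).flatten,
         (items.map (fun r => (bodyA r).flatten)).flatten,
         (items.map eS).sum) := by
  fun_induction pvAltRec items off with
  | case1 off => simp [offW]
  | case2 off r hh dd tl bd =>
      have htail : (PySem.Chars.slice r.2.toList (some 2) none
          ++ List.replicate ((((PySem.Chars.slice r.2.toList (some 2) none).length / 2 + 31) / 32) * 64
              - (PySem.Chars.slice r.2.toList (some 2) none).length) '0') = eT r := by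
        simp only [eT, eP, eD, eH]
        congr 2
        omega
      simp only [bd, tl, dd, hh, offW, List.map_cons, List.map_nil, List.flatten,
        List.sum_cons, List.sum_nil, Nat.add_zero, Prod.mk.injEq]
      refine ⟨by simp, ?_, ?_⟩
      · rw [htail]; simp [bodyA, eD, eH]
      · rw [htail]; exact size_eq r
  | case3 off a b t mid h1 b1 s1 hx1 h2 b2 s2 hx2 ihl ihr =>
      simp only [ihl, Prod.mk.injEq] at hx1
      obtain ⟨e1, e2, e3⟩ := hx1
      subst e1; subst e2; subst e3
      simp only [ihr, Prod.mk.injEq] at hx2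
      obtain ⟨f1, f2, f3⟩ := hx2
      subst f1; subst f2; subst f3
      have hsplit : (a :: b :: t) = (a :: b :: t).take ((a :: b :: t).length / 2)
          ++ (a :: b :: t).drop ((a :: b :: t).length / 2) := by simp
      simp only [Prod.mk.injEq]
      refine ⟨?_, ?_, ?_⟩
      · conv_rhs => rw [hsplit]
        rw [List.map_append, offW_append, List.flatten_append]
      · conv_rhs => rw [hsplit]
        rw [List.map_append, List.flatten_append]
      · conv_rhs => rw [hsplit]
        rw [List.map_append, List.sum_append]

lemma fold1 (sizes : List Nat) (parts : List (List Char)) (off : Nat) :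
    (sizes.foldl (fun (st : List (List Char) × Nat) sz => (st.1 ++ [pyFormat064x st.2], st.2 + sz))
      (parts, off)).1 = parts ++ offW off sizes := by
  induction sizes generalizing parts off with
  | nil => simp [offW]
  | cons s ss ih => simp [offW, List.foldl_cons, ih]

lemma enum_flatMap (results : List (Bool × String)) :
    (PySem.List.enumerate results).flatMap
      (fun ir : Int × (Bool × String) =>
        [pyFormat064x (if ir.2.1 then 1 else 0), pyFormat064x 64,
         pyFormat064x ((results.map ((fun h : List Char => h.length / 2)
             ∘ (fun r : Bool × String => PySem.Chars.slice r.2.toList (some 2) none))).getD ir.1.toNat 0),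
         (results.map (fun r : Bool × String => PySem.Chars.slice r.2.toList (some 2) none)).getD ir.1.toNat []
           ++ List.replicate ((results.map ((fun d => (d + 31) / 32 * 32)
                 ∘ (fun h : List Char => h.length / 2)
                 ∘ (fun r : Bool × String => PySem.Chars.slice r.2.toList (some 2) none))).getD ir.1.toNat 0 * 2
               - ((results.map (fun r : Bool × String => PySem.Chars.slice r.2.toList (some 2) none)).getD ir.1.toNat []).length) '0'])
      = results.flatMap bodyA := by
  rw [List.flatMap_def, List.flatMap_def]
  congr 1
  apply List.ext_getElem
  · simp [PySem.List.length_enumerate]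
  · intro k h1 h2
    have hk : k < results.length := by
      simpa [PySem.List.length_enumerate] using h1
    simp [PySem.List.getElem_enumerate, bodyA, eD, eP, eT, eH, Function.comp,
      List.getD_eq_getElem?_getD, List.getElem?_map, List.getElem?_eq_getElem hk]

lemma A_eq (results : List (Bool × String)) :
    encode_aggregate3_response_py results
      = String.mk ('0' :: 'x' ::
          (([pyFormat064x 32, pyFormat064x results.length]
              ++ offW (results.length * 32) (results.map eS)
              ++ results.flatMap bodyA).flatten)) := by
  unfold encode_aggregate3_response_py
  simp only [List.map_map]
  rw [show ((fun p => 96 + p) ∘ (fun d => (d + 31) / 32 * 32) ∘ (fun h : List Char => h.length / 2)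
        ∘ (fun r : Bool × String => PySem.Chars.slice r.2.toList (some 2) none)) = eS from rfl]
  rw [fold1]
  rw [PySem.List.foldl_append_eq_flatMap
    (g := fun ir : Int × (Bool × String) =>
      [pyFormat064x (if ir.2.1 then 1 else 0), pyFormat064x 64,
       pyFormat064x ((results.map ((fun h : List Char => h.length / 2)
           ∘ (fun r : Bool × String => PySem.Chars.slice r.2.toList (some 2) none))).getD ir.1.toNat 0),
       (results.map (fun r : Bool × String => PySem.Chars.slice r.2.toList (some 2) none)).getD ir.1.toNat []
         ++ List.replicate ((results.map ((fun d => (d + 31) / 32 * 32)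
               ∘ (fun h : List Char => h.length / 2)
               ∘ (fun r : Bool × String => PySem.Chars.slice r.2.toList (some 2) none))).getD ir.1.toNat 0 * 2
             - ((results.map (fun r : Bool × String => PySem.Chars.slice r.2.toList (some 2) none)).getD ir.1.toNat []).length) '0'])]
  rw [enum_flatMap]

lemma flatten_bodies (rs : List (Bool × String)) :
    (rs.flatMap bodyA).flatten = (rs.map (fun r => (bodyA r).flatten)).flatten := by
  induction rs with
  | nil => rfl
  | cons r t ih => simp [List.flatMap_cons, ih]

-- ===== VERDICT (by name: the statement is the Claim_ definition above) =====
theorem encode_aggregate3_response_py_spec : Claim_equal_encode_aggregate3_response_py := by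
  intro results _
  unfold Spec_encode_aggregate3_response_py
  rw [A_eq]
  unfold encode_aggregate3_response_py_alt
  rw [pvAltRec_eq]
  simp [List.flatten_append, flatten_bodies]
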